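-- pv_equiv track=rewrite | github.com/sissixu00/2017A2CS | Cha 25/recursion2.py | splitOdd10
-- ===== SOURCE A (Python) =====
-- def splitOdd10(nums,x = 0,y = 0,start = 0):
--     if start >= len(nums):
--         if x % 10 == 0 and y % 2 == 1:
--             return True
--         if x % 2 == 1 and y % 10 == 0:
--             return True
--         return False
--     return splitOdd10(nums, x+nums[start], y, start+1) or splitOdd10(nums, x, y+nums[start], start+1)
-- ===== SOURCE B (Python) =====
-- def splitOdd10(nums, x=0, y=0, start=0):
--     # Residue DP: only (x % 10, y % 10) matters for the final test, so track the
--     # set of reachable residue pairs instead of exploring 2^n assignments.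
--     n = len(nums)
--     pairs = {(x % 10, y % 10)}
--     for i in range(start, n):
--         v = nums[i]
--         pairs = {((a + v) % 10, b) for (a, b) in pairs} | {(a, (b + v) % 10) for (a, b) in pairs}
--     return any((a % 10 == 0 and b % 2 == 1) or (a % 2 == 1 and b % 10 == 0) for (a, b) in pairs)
-- ===== Notes on version B (the rewrite author's own statement) =====
-- stated objective: alternative
-- what changed: Replaced the two-way backtracking recursion over group assignments by a single left-to-right pass that tracks the set of reachable (x mod 10, y mod 10) residue pairs (at most 100 states) and tests the final condition on each reachable pair.
import Mathlib
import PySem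

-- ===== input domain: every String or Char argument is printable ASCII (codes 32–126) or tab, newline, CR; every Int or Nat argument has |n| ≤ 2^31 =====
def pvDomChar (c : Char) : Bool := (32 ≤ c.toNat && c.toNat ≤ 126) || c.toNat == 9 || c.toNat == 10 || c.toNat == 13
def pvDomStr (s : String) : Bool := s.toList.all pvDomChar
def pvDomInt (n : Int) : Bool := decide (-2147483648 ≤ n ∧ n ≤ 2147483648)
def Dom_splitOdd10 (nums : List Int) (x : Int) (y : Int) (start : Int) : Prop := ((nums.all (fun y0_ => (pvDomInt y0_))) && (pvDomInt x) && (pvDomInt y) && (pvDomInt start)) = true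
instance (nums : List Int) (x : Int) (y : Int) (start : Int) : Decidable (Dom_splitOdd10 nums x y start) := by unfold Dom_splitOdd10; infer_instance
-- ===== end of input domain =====

-- B replaces A's two-way backtracking recursion by a one-pass DP over the set of
-- reachable (x mod 10, y mod 10) residue pairs; objective: alternative algorithm.


-- ===== PORT A =====
def splitOdd10 (nums : List Int) (x : Int) (y : Int) (start : Int) : Bool :=
  if (nums.length : Int) ≤ start then
    if PySem.Int.mod x 10 == 0 && PySem.Int.mod y 2 == 1 then true
    else if PySem.Int.mod x 2 == 1 && PySem.Int.mod y 10 == 0 then true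
    else false
  else
    match PySem.List.pyGet? nums start with
    | none => false  -- nums[start] raises IndexError here; excluded by Pre_
    | some v => splitOdd10 nums (x + v) y (start + 1) || splitOdd10 nums x (y + v) (start + 1)
termination_by ((nums.length : Int) - start).toNat
decreasing_by all_goals omega

-- ===== PORT B =====
def splitOdd10_alt (nums : List Int) (x : Int) (y : Int) (start : Int) : Bool :=
  let n : Int := (nums.length : Int)
  let pairs : PySem.Set (Int × Int) :=
    (PySem.List.pyRange start n 1).foldl
      (fun S i =>
        let v := PySem.List.pyGetD nums i 0  -- nums[i]; IndexError excluded by Pre_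
        PySem.Set.union
          (PySem.Set.ofList (S.map (fun p => (PySem.Int.mod (p.1 + v) 10, p.2))))
          (S.map (fun p => (p.1, PySem.Int.mod (p.2 + v) 10))))
      (PySem.Set.ofList [(PySem.Int.mod x 10, PySem.Int.mod y 10)])
  pairs.any (fun p =>
    (PySem.Int.mod p.1 10 == 0 && PySem.Int.mod p.2 2 == 1) ||
    (PySem.Int.mod p.1 2 == 1 && PySem.Int.mod p.2 10 == 0))

-- ===== PRECONDITION & SPEC =====
-- A (and B) raise IndexError exactly when start < -len(nums): the recursion then reads nums[start].
def Pre_splitOdd10 (nums : List Int) (x : Int) (y : Int) (start : Int) : Prop :=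
  -(nums.length : Int) ≤ start
instance (nums : List Int) (x : Int) (y : Int) (start : Int) : Decidable (Pre_splitOdd10 nums x y start) := by unfold Pre_splitOdd10; infer_instance

def pvWitness_splitOdd10 : List Int × Int × Int × Int := ([3, 4], 0, 0, 0)

def Spec_splitOdd10 (nums : List Int) (x : Int) (y : Int) (start : Int) (out : Bool) : Prop := out = splitOdd10_alt nums x y start
instance (nums : List Int) (x : Int) (y : Int) (start : Int) (out : Bool) : Decidable (Spec_splitOdd10 nums x y start out) := by unfold Spec_splitOdd10; infer_instance

-- ===== CLAIM (what is proved, stated in full; the proofs are below) =====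
def Claim_equal_splitOdd10 : Prop := ∀ (nums : List Int) (x : Int) (y : Int) (start : Int), Dom_splitOdd10 nums x y start → Pre_splitOdd10 nums x y start → Spec_splitOdd10 nums x y start (splitOdd10 nums x y start)

-- ===== LEMMAS AND PROOFS =====

-- The base test of A, on a pair of accumulators.
def pvBase (x y : Int) : Bool :=
  (PySem.Int.mod x 10 == 0 && PySem.Int.mod y 2 == 1) ||
  (PySem.Int.mod x 2 == 1 && PySem.Int.mod y 10 == 0)

-- A's recursion, abstracted to the list of remaining items.
def pvF : List Int → Int → Int → Bool
  | [], x, y => pvBase x y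
  | v :: L, x, y => pvF L (x + v) y || pvF L x (y + v)

-- pvF only depends on the accumulators mod 10.
theorem pvF_mod (L : List Int) : ∀ (x y x' y' : Int), x % 10 = x' % 10 → y % 10 = y' % 10 →
    pvF L x y = pvF L x' y' := by
  induction L with
  | nil =>
    intro x y x' y' hx hy
    have h2 : x % 2 = x' % 2 := by omega
    have h2' : y % 2 = y' % 2 := by omega
    simp only [pvF, pvBase, PySem.Int.mod_eq_emod_of_pos (by omega : (0:Int) < 10),
      PySem.Int.mod_eq_emod_of_pos (by omega : (0:Int) < 2), hx, hy, h2, h2']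
  | cons v L ih =>
    intro x y x' y' hx hy
    simp only [pvF]
    rw [ih (x + v) y (x' + v) y' (by omega) hy, ih x (y + v) x' (y' + v) hx (by omega)]

theorem pvIfChain (a b : Bool) :
    (if a = true then true else if b = true then true else false) = (a || b) := by
  cases a <;> cases b <;> simp

-- A equals pvF on the list of items it will visit.
theorem splitOdd10_eq_pvF (k : Nat) (nums : List Int) (x y start : Int)
    (hk : ((nums.length : Int) - start).toNat ≤ k) (h : -(nums.length : Int) ≤ start) :
    splitOdd10 nums x y start =
      pvF ((PySem.List.pyRange start (nums.length : Int) 1).map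
            (fun i => PySem.List.pyGetD nums i 0)) x y := by
  induction k generalizing x y start with
  | zero =>
    have hle : (nums.length : Int) ≤ start := by omega
    rw [splitOdd10, if_pos hle, PySem.List.pyRange_one_eq_nil hle, pvIfChain]
    simp only [List.map_nil, pvF, pvBase]
  | succ k ih =>
    by_cases hle : (nums.length : Int) ≤ start
    · rw [splitOdd10, if_pos hle, PySem.List.pyRange_one_eq_nil hle, pvIfChain]
      simp only [List.map_nil, pvF, pvBase]
    · have hlt : start < (nums.length : Int) := by omega
      have hin : PySem.Raise.InRange nums.length start := by
        constructor <;> omega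
      obtain ⟨v, hv⟩ : ∃ v, PySem.List.pyGet? nums start = some v := by
        cases hg : PySem.List.pyGet? nums start with
        | none => exact absurd ((PySem.List.pyGet?_eq_none_iff _ _).mp hg) (by simpa using hin)
        | some v => exact ⟨v, rfl⟩
      have hvd : PySem.List.pyGetD nums start 0 = v := by
        simp [PySem.List.pyGetD, hv]
      rw [splitOdd10, if_neg hle, hv]
      rw [PySem.List.pyRange_one_cons hlt]
      simp only [List.map_cons, pvF, hvd]
      rw [ih (x + v) y (start + 1) (by omega) (by omega),
          ih x (y + v) (start + 1) (by omega) (by omega)]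

-- B's fold step over residue-pair sets.
def pvStep (v : Int) (S : List (Int × Int)) : List (Int × Int) :=
  PySem.Set.union
    (PySem.Set.ofList (S.map (fun p => (PySem.Int.mod (p.1 + v) 10, p.2))))
    (S.map (fun p => (p.1, PySem.Int.mod (p.2 + v) 10)))

theorem pvAny_step (v : Int) (S : List (Int × Int)) (Q : Int × Int → Bool) :
    (pvStep v S).any Q =
      S.any (fun p => Q ((p.1 + v) % 10, p.2) || Q (p.1, (p.2 + v) % 10)) := by
  have hm : ∀ a : Int, PySem.Int.mod a 10 = a % 10 := fun a =>
    PySem.Int.mod_eq_emod_of_pos (by omega)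
  rw [Bool.eq_iff_iff]
  simp only [List.any_eq_true, pvStep, Bool.or_eq_true]
  constructor
  · rintro ⟨p, hp, hQ⟩
    rcases (PySem.Set.mem_union _ _ _).mp hp with hp | hp
    · rcases List.mem_map.mp ((PySem.Set.mem_ofList _ _).mp hp) with ⟨q, hq, rfl⟩
      rw [hm] at hQ
      exact ⟨q, hq, Or.inl hQ⟩
    · rcases List.mem_map.mp hp with ⟨q, hq, rfl⟩
      rw [hm] at hQ
      exact ⟨q, hq, Or.inr hQ⟩
  · rintro ⟨p, hp, hQ | hQ⟩
    · rw [← hm] at hQ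
      exact ⟨_, (PySem.Set.mem_union _ _ _).mpr (Or.inl ((PySem.Set.mem_ofList _ _).mpr
        (List.mem_map.mpr ⟨p, hp, rfl⟩))), hQ⟩
    · rw [← hm] at hQ
      exact ⟨_, (PySem.Set.mem_union _ _ _).mpr (Or.inr (List.mem_map.mpr ⟨p, hp, rfl⟩)), hQ⟩

-- Folding B's step over the index range and then testing the final condition
-- equals testing pvF (A's recursion) on every start pair.
theorem pvFold_any (idx : List Int) (nums : List Int) : ∀ S : List (Int × Int),
    (idx.foldl (fun S i => pvStep (PySem.List.pyGetD nums i 0) S) S).any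
        (fun p => pvBase p.1 p.2) =
      S.any (fun p => pvF (idx.map (fun i => PySem.List.pyGetD nums i 0)) p.1 p.2) := by
  induction idx with
  | nil => intro S; rfl
  | cons i idx ih =>
    intro S
    rw [List.foldl_cons, ih, pvAny_step]
    refine congrArg S.any (funext fun p => ?_)
    simp only [List.map_cons, pvF]
    rw [pvF_mod _ ((p.1 + PySem.List.pyGetD nums i 0) % 10) p.2
          (p.1 + PySem.List.pyGetD nums i 0) p.2 (by omega) rfl,
        pvF_mod _ p.1 ((p.2 + PySem.List.pyGetD nums i 0) % 10)
          p.1 (p.2 + PySem.List.pyGetD nums i 0) rfl (by omega)]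

-- B equals pvF on the same item list.
theorem splitOdd10_alt_eq_pvF (nums : List Int) (x y start : Int) :
    splitOdd10_alt nums x y start =
      pvF ((PySem.List.pyRange start (nums.length : Int) 1).map
            (fun i => PySem.List.pyGetD nums i 0)) x y := by
  have h1 : splitOdd10_alt nums x y start =
      ((PySem.List.pyRange start (nums.length : Int) 1).foldl
        (fun S i => pvStep (PySem.List.pyGetD nums i 0) S)
        (PySem.Set.ofList [(PySem.Int.mod x 10, PySem.Int.mod y 10)])).any
        (fun p => pvBase p.1 p.2) := rfl
  rw [h1, pvFold_any]
  have hm : ∀ a : Int, PySem.Int.mod a 10 = a % 10 := fun a =>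
    PySem.Int.mod_eq_emod_of_pos (by omega)
  have h2 : (PySem.Set.ofList [(PySem.Int.mod x 10, PySem.Int.mod y 10)] : List (Int × Int)) =
      [(PySem.Int.mod x 10, PySem.Int.mod y 10)] := rfl
  rw [h2]
  simp only [List.any_cons, List.any_nil, Bool.or_false]
  rw [hm, hm]
  exact pvF_mod _ (x % 10) (y % 10) x y (by omega) (by omega)

-- ===== VERDICT (by name: the statement is the Claim_ definition above) =====
theorem splitOdd10_spec : Claim_equal_splitOdd10 := by
  intro nums x y start _ hpre
  unfold Spec_splitOdd10
  rw [splitOdd10_eq_pvF ((nums.length : Int) - start).toNat nums x y start le_rfl hpre,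
      splitOdd10_alt_eq_pvF]
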